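-- pv_equiv track=rewrite | github.com/AndresAriasUrena/radiodos | Migracion/migration_processor_FINAL.py | fix_urls
-- ===== SOURCE A (Python) =====
-- def fix_urls(line):
--     """Corrige URLs para el dominio correcto"""
--     corrections = [
--         ('https://radiodos.com/wp-content/uploads/', 'https://radiodos.aurigital.com/wp-content/uploads/'),
--         ('http://radiodos.com/wp-content/uploads/', 'https://radiodos.aurigital.com/wp-content/uploads/'),
--         ('https://radiodos.com/', 'https://radiodos.aurigital.com/'),
--         ('http://radiodos.com/', 'https://radiodos.aurigital.com/')
--     ]
--
--     corrected_line = line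
--     for old_url, new_url in corrections:
--         corrected_line = corrected_line.replace(old_url, new_url)
--
--     return corrected_line
-- ===== SOURCE B (Python) =====
-- def fix_urls(line):
--     """Corrige URLs para el dominio correcto"""
--     out = []
--     i = 0
--     n = len(line)
--     while i < n:
--         if line.startswith('https://radiodos.com/', i):
--             out.append('https://radiodos.aurigital.com/')
--             i += 21
--         elif line.startswith('http://radiodos.com/', i):
--             out.append('https://radiodos.aurigital.com/')
--             i += 20
--         else:
--             out.append(line[i])
--             i += 1
--     return ''.join(out)
-- ===== Notes on version B (the rewrite author's own statement) =====
-- stated objective: faster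
-- what changed: Replaces four sequential full-string .replace passes by one left-to-right scan that rewrites the two radiodos.com roots (https tried before http) in a single pass, which also covers the uploads variants since their tail is unchanged.
import Mathlib
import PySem

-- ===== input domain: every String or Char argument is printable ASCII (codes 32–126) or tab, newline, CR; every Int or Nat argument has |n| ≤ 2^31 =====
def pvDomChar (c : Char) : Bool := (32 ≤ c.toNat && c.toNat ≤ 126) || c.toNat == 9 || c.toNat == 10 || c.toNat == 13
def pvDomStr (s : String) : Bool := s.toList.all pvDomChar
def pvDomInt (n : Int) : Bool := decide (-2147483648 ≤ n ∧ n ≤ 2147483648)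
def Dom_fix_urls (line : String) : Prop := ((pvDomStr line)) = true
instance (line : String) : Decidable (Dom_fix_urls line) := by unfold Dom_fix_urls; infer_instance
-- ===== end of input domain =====

-- B replaces A's four sequential .replace passes with one left-to-right scan rewriting the two
-- radiodos.com roots (https before http), which covers the uploads variants since their tail is kept.

-- ===== PORT A =====
def fix_urls (line : String) : String :=
  let corrections : List (String × String) :=
    [("https://radiodos.com/wp-content/uploads/", "https://radiodos.aurigital.com/wp-content/uploads/"),
     ("http://radiodos.com/wp-content/uploads/", "https://radiodos.aurigital.com/wp-content/uploads/"),
     ("https://radiodos.com/", "https://radiodos.aurigital.com/"),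
     ("http://radiodos.com/", "https://radiodos.aurigital.com/")]
  corrections.foldl (fun corrected_line p => PySem.Str.replace corrected_line p.1 p.2) line

-- ===== PORT B =====
def pvRootS : List Char := "https://radiodos.com/".toList      -- length 21
def pvRootH : List Char := "http://radiodos.com/".toList       -- length 20
def pvTarget : List Char := "https://radiodos.aurigital.com/".toList

-- the while loop of Source B: out-accumulator, advance by 21 / 20 / 1
def pvFixGo (acc : List Char) : List Char → List Char
  | [] => acc
  | c :: t =>
    if pvRootS.isPrefixOf (c :: t) then pvFixGo (acc ++ pvTarget) (t.drop 20)
    else if pvRootH.isPrefixOf (c :: t) then pvFixGo (acc ++ pvTarget) (t.drop 19)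
    else pvFixGo (acc ++ [c]) t
termination_by l => l.length
decreasing_by all_goals simp [List.length_drop]

def fix_urls_alt (line : String) : String := String.ofList (pvFixGo [] line.toList)

-- ===== PRECONDITION & SPEC =====
def Spec_fix_urls (line : String) (out : String) : Prop := out = fix_urls_alt line
instance (line : String) (out : String) : Decidable (Spec_fix_urls line out) := by unfold Spec_fix_urls; infer_instance

-- ===== CLAIM (what is proved, stated in full; the proofs are below) =====
def Claim_equal_fix_urls : Prop := ∀ (line : String), Dom_fix_urls line → Spec_fix_urls line (fix_urls line)

-- ===== LEMMAS AND PROOFS =====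

-- generic prioritized multi-rule scanner (proof device relating both ports)
def pvFirstMatch : List (List Char × List Char) → List Char → Option (List Char × List Char)
  | [], _ => none
  | (p, t) :: rs, l => if p ≠ [] ∧ p.isPrefixOf l then some (p, t) else pvFirstMatch rs l

def pvScan (rules : List (List Char × List Char)) : List Char → List Char
  | [] => []
  | c :: t =>
    match pvFirstMatch rules (c :: t) with
    | some (p, u) => u ++ pvScan rules (t.drop (p.length - 1))
    | none => c :: pvScan rules t
termination_by l => l.length
decreasing_by all_goals simp [List.length_drop]

lemma pvFirstMatch_mem {rules : List (List Char × List Char)} {l : List Char}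
    {r : List Char × List Char} (h : pvFirstMatch rules l = some r) :
    r ∈ rules ∧ r.1 ≠ [] ∧ r.1 <+: l := by
  induction rules with
  | nil => simp [pvFirstMatch] at h
  | cons hd tl ih =>
    obtain ⟨p, t⟩ := hd
    rw [pvFirstMatch] at h
    split_ifs at h with hc
    · cases h
      exact ⟨List.mem_cons_self, hc.1, List.isPrefixOf_iff_prefix.mp hc.2⟩
    · obtain ⟨h1, h2, h3⟩ := ih h
      exact ⟨List.mem_cons_of_mem _ h1, h2, h3⟩

lemma pvFirstMatch_none_iff {rules : List (List Char × List Char)} {l : List Char} :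
    pvFirstMatch rules l = none ↔ ∀ r ∈ rules, r.1 ≠ [] → ¬ r.1 <+: l := by
  induction rules with
  | nil => simp [pvFirstMatch]
  | cons hd tl ih =>
    obtain ⟨p, t⟩ := hd
    rw [pvFirstMatch]
    split_ifs with hc
    · simp only [false_iff]
      intro H
      exact H (p, t) List.mem_cons_self hc.1 (List.isPrefixOf_iff_prefix.mp hc.2)
    · rw [ih]
      constructor
      · intro H r hr
        rcases List.mem_cons.mp hr with h | h
        · subst h
          intro hne hpre
          exact hc ⟨hne, List.isPrefixOf_iff_prefix.mpr hpre⟩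
        · exact H r h
      · intro H r hr
        exact H r (List.mem_cons_of_mem _ hr)

lemma pvFirstMatch_append_some {rules rules' : List (List Char × List Char)} {l : List Char}
    {r : List Char × List Char} (h : pvFirstMatch rules l = some r) :
    pvFirstMatch (rules ++ rules') l = some r := by
  induction rules with
  | nil => simp [pvFirstMatch] at h
  | cons hd tl ih =>
    obtain ⟨p, t⟩ := hd
    rw [pvFirstMatch] at h
    rw [List.cons_append, pvFirstMatch]
    split_ifs at h with hc
    · simp only [if_pos hc]
      exact h
    · simp only [if_neg hc]
      exact ih h

lemma pvFirstMatch_append_none {rules rules' : List (List Char × List Char)} {l : List Char}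
    (h : pvFirstMatch rules l = none) :
    pvFirstMatch (rules ++ rules') l = pvFirstMatch rules' l := by
  induction rules with
  | nil => simp
  | cons hd tl ih =>
    obtain ⟨p, t⟩ := hd
    rw [pvFirstMatch] at h
    rw [List.cons_append, pvFirstMatch]
    split_ifs at h with hc
    rw [if_neg hc]
    exact ih h

lemma pvScan_nil (rules : List (List Char × List Char)) : pvScan rules [] = [] := by
  rw [pvScan]

lemma pvScan_none {rules : List (List Char × List Char)} {c : Char} {t : List Char}
    (h : pvFirstMatch rules (c :: t) = none) :
    pvScan rules (c :: t) = c :: pvScan rules t := by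
  rw [pvScan, h]

lemma pvScan_some {rules : List (List Char × List Char)} {l p u : List Char}
    (h : pvFirstMatch rules l = some (p, u)) :
    pvScan rules l = u ++ pvScan rules (l.drop p.length) := by
  obtain ⟨-, hne, hpre⟩ := pvFirstMatch_mem h
  cases l with
  | nil => exact absurd (List.prefix_nil.mp hpre) hne
  | cons c t =>
    rw [pvScan, h]
    obtain ⟨k, hk⟩ := Nat.exists_eq_succ_of_ne_zero (fun h0 => hne (List.length_eq_zero_iff.mp h0))
    simp [hk]

-- a mismatch strictly inside u blocks p from being a prefix of u ++ x for ANY x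
lemma pv_not_prefix {p u x : List Char} (j : Nat) (hjp : j < p.length) (hju : j < u.length)
    (hne : p[j]? ≠ u[j]?) : ¬ p <+: (u ++ x) := by
  intro h
  obtain ⟨r, hr⟩ := h
  have h1 : (u ++ x)[j]? = p[j]? := by
    rw [← hr]
    exact List.getElem?_append_left hjp
  have h2 : (u ++ x)[j]? = u[j]? := List.getElem?_append_left hju
  exact hne (h1 ▸ h2)

-- if q starts with 'h' and u is nonempty without 'h', q cannot start anywhere in u ++ x at 0
lemma pv_not_prefix_h {q u x : List Char} (hq : q[0]? = some 'h') (hu : u ≠ [])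
    (hh : 'h' ∉ u) : ¬ q <+: (u ++ x) := by
  have hul : 0 < u.length := List.length_pos_of_ne_nil hu
  have hql : 0 < q.length := by
    by_contra h0
    rw [List.getElem?_eq_none (by omega)] at hq
    simp at hq
  refine pv_not_prefix 0 hql hul ?_
  rw [hq, List.getElem?_eq_getElem hul]
  intro heq
  exact hh (Option.some.inj heq ▸ List.getElem_mem hul)

-- pass-through: if no rule can match starting inside u (for this x), the scan copies u
lemma pvScan_append (rules : List (List Char × List Char)) (u x : List Char)
    (H : ∀ i < u.length, ∀ r ∈ rules, r.1 ≠ [] → ¬ r.1 <+: (u.drop i ++ x)) :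
    pvScan rules (u ++ x) = u ++ pvScan rules x := by
  induction u with
  | nil => simp
  | cons a u' ih =>
    have hn : pvFirstMatch rules (a :: (u' ++ x)) = none := by
      rw [pvFirstMatch_none_iff]
      intro r hr hne
      have := H 0 (by simp) r hr hne
      simpa using this
    have ih' : pvScan rules (u' ++ x) = u' ++ pvScan rules x := by
      apply ih
      intro i hi r hr hne
      have := H (i + 1) (by simpa using Nat.succ_lt_succ hi) r hr hne
      simpa using this
    rw [List.cons_append, pvScan_none hn, ih', List.cons_append]

-- the scan cannot CREATE a prefix q avoiding 'h' when all rule targets start with 'h'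
lemma pvScan_noNew (rules : List (List Char × List Char))
    (hT : ∀ r ∈ rules, r.2[0]? = some 'h') :
    ∀ t q : List Char, 'h' ∉ q → ¬ q <+: t → ¬ q <+: pvScan rules t := by
  suffices H : ∀ n, ∀ t q : List Char, t.length ≤ n → 'h' ∉ q → ¬ q <+: t → ¬ q <+: pvScan rules t by
    intro t q
    exact H t.length t q le_rfl
  intro n
  induction n with
  | zero =>
    intro t q hlen hh hno
    have ht : t = [] := List.length_eq_zero_iff.mp (Nat.le_zero.mp hlen)
    subst ht
    rw [pvScan_nil]
    intro habs
    exact hno (List.prefix_nil.mp habs ▸ List.nil_prefix)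
  | succ n ih =>
    intro t q hlen hh hno
    cases t with
    | nil =>
      rw [pvScan_nil]
      intro habs
      exact hno (List.prefix_nil.mp habs ▸ List.nil_prefix)
    | cons c t' =>
      cases hm : pvFirstMatch rules (c :: t') with
      | some r =>
        obtain ⟨pp, tt⟩ := r
        rw [pvScan_some hm]
        intro habs
        have htt : tt[0]? = some 'h' := hT _ (pvFirstMatch_mem hm).1
        have httne : tt ≠ [] := by
          intro h0
          rw [h0] at htt
          simp at htt
        cases q with
        | nil => exact hno List.nil_prefix
        | cons d q' =>
          obtain ⟨r2, hr2⟩ := habs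
          have h1 : (tt ++ pvScan rules ((c :: t').drop pp.length))[0]? = some d := by
            rw [← hr2]
            simp
          have h2 : (tt ++ pvScan rules ((c :: t').drop pp.length))[0]? = tt[0]? :=
            List.getElem?_append_left (List.length_pos_of_ne_nil httne)
          have : d = 'h' := by
            rw [h2, htt] at h1
            exact (Option.some.inj h1).symm
          exact hh (this ▸ List.mem_cons_self)
      | none =>
        rw [pvScan_none hm]
        intro habs
        cases q with
        | nil => exact hno List.nil_prefix
        | cons d q' =>
          obtain ⟨hd, hq'⟩ := List.cons_prefix_cons.mp habs
          subst hd
          have hno' : ¬ q' <+: t' := fun h => hno (List.cons_prefix_cons.mpr ⟨rfl, h⟩)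
          have hh' : 'h' ∉ q' := fun h => hh (List.mem_cons_of_mem _ h)
          exact ih t' q' (by simpa using Nat.succ_le_succ_iff.mp hlen) hh' hno' hq'

lemma pvComp (R : List (List Char × List Char)) (p u : List Char)
    (hRp : ∀ r ∈ R, r.1 ≠ [] ∧ r.1[0]? = some 'h')
    (hRT : ∀ r ∈ R, r.2[0]? = some 'h')
    (hp : p ≠ []) (hp0 : p[0]? = some 'h') (hpi : 'h' ∉ p.drop 1)
    (hmm : ∀ r ∈ R, r.2 ≠ [] ∧ 'h' ∉ r.2.drop 1 ∧
             ∃ j, j < p.length ∧ j < r.2.length ∧ p[j]? ≠ r.2[j]?) :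
    ∀ s, pvScan [(p, u)] (pvScan R s) = pvScan (R ++ [(p, u)]) s := by
  suffices H : ∀ n, ∀ s : List Char, s.length ≤ n →
      pvScan [(p, u)] (pvScan R s) = pvScan (R ++ [(p, u)]) s by
    intro s
    exact H s.length s le_rfl
  intro n
  induction n with
  | zero =>
    intro s hlen
    have hs : s = [] := List.length_eq_zero_iff.mp (Nat.le_zero.mp hlen)
    subst hs
    simp [pvScan_nil]
  | succ n ih =>
    intro s hlen
    cases s with
    | nil => simp [pvScan_nil]
    | cons c t =>
      cases hm : pvFirstMatch R (c :: t) with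
      | some r =>
        obtain ⟨q, U⟩ := r
        obtain ⟨hmem, hqne, hqpre⟩ := pvFirstMatch_mem hm
        obtain ⟨hUne, hUh, j, hjp, hjU, hjne⟩ := hmm _ hmem
        rw [pvScan_some hm]
        have hpass : ∀ y : List Char, pvScan [(p, u)] (U ++ y) = U ++ pvScan [(p, u)] y := by
          intro y
          apply pvScan_append
          intro i hi r hr hne
          have hrpu : r = (p, u) := List.mem_singleton.mp hr
          subst hrpu
          cases i with
          | zero =>
            rw [List.drop_zero]
            exact pv_not_prefix j hjp hjU hjne
          | succ i =>
            apply pv_not_prefix_h hp0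
            · intro h0
              have := congrArg List.length h0
              simp [List.length_drop] at this
              omega
            · intro hmemh
              apply hUh
              have : U.drop (i + 1) = (U.drop 1).drop i := by
                rw [List.drop_drop, Nat.add_comm]
              rw [this] at hmemh
              exact List.drop_subset _ _ hmemh
        have hql : 1 ≤ q.length := List.length_pos_of_ne_nil hqne
        have hdlen : ((c :: t).drop q.length).length ≤ n := by
          simp only [List.length_drop, List.length_cons] at *
          omega
        rw [hpass, ih _ hdlen, pvScan_some (pvFirstMatch_append_some hm)]
      | none =>
        have hmnone := pvFirstMatch_none_iff.mp hm
        by_cases hpre : p <+: (c :: t)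
        · obtain ⟨x, hx⟩ := hpre
          have hinner : pvScan R (p ++ x) = p ++ pvScan R x := by
            apply pvScan_append
            intro i hi r hr hne
            cases i with
            | zero =>
              rw [List.drop_zero, hx]
              exact hmnone r hr hne
            | succ i =>
              apply pv_not_prefix_h (hRp r hr).2
              · intro h0
                have := congrArg List.length h0
                simp [List.length_drop] at this
                omega
              · intro hmemh
                apply hpi
                have : p.drop (i + 1) = (p.drop 1).drop i := by
                  rw [List.drop_drop, Nat.add_comm]
                rw [this] at hmemh
                exact List.drop_subset _ _ hmemh
          have houter : pvFirstMatch [(p, u)] (p ++ pvScan R x) = some (p, u) := by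
            rw [pvFirstMatch,
              if_pos ⟨hp, List.isPrefixOf_iff_prefix.mpr (List.prefix_append _ _)⟩]
          have hxlen : x.length ≤ n := by
            have := congrArg List.length hx
            have hpl : 1 ≤ p.length := List.length_pos_of_ne_nil hp
            simp [List.length_append] at this
            simp only [List.length_cons] at hlen
            omega
          have hcomb : pvFirstMatch (R ++ [(p, u)]) (c :: t) = some (p, u) := by
            rw [pvFirstMatch_append_none hm, pvFirstMatch,
              if_pos ⟨hp, List.isPrefixOf_iff_prefix.mpr ⟨x, hx⟩⟩]
          rw [← hx] at hcomb ⊢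
          rw [hinner, pvScan_some houter, List.drop_left, ih x hxlen,
            pvScan_some hcomb, List.drop_left]
        · rw [pvScan_none hm]
          have houter : pvFirstMatch [(p, u)] (c :: pvScan R t) = none := by
            rw [pvFirstMatch_none_iff]
            intro r hr hne
            have hrpu : r = (p, u) := List.mem_singleton.mp hr
            subst hrpu
            intro habs
            cases hpc : p with
            | nil => exact hp hpc
            | cons d p' =>
              subst hpc
              obtain ⟨hd, hp'⟩ := List.cons_prefix_cons.mp habs
              subst hd
              have hnp' : ¬ p' <+: t := fun h => hpre (List.cons_prefix_cons.mpr ⟨rfl, h⟩)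
              have hh' : 'h' ∉ p' := by simpa using hpi
              exact pvScan_noNew R hRT t p' hh' hnp' hp'
          have hcomb : pvFirstMatch (R ++ [(p, u)]) (c :: t) = none := by
            rw [pvFirstMatch_append_none hm, pvFirstMatch_none_iff]
            intro r hr hne
            have hrpu : r = (p, u) := List.mem_singleton.mp hr
            subst hrpu
            exact hpre
          have htlen : t.length ≤ n := Nat.succ_le_succ_iff.mp hlen
          rw [pvScan_none houter, ih t htlen, pvScan_none hcomb]

-- ===== pattern abbreviations (proof helpers) =====
def pvP1 : List Char := "https://radiodos.com/wp-content/uploads/".toList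
def pvP2 : List Char := "http://radiodos.com/wp-content/uploads/".toList
def pvT1 : List Char := "https://radiodos.aurigital.com/wp-content/uploads/".toList
def pvW : List Char := "wp-content/uploads/".toList

-- ===== bridge: PySem.Chars.replace = single-rule pvScan =====
lemma pv_go_eq (old new : List Char) (hold : old ≠ []) :
    ∀ (fuel : Nat) (l acc : List Char), l.length ≤ fuel →
      PySem.Chars.replace.go old new fuel l acc = acc.reverse ++ pvScan [(old, new)] l := by
  intro fuel
  induction fuel with
  | zero =>
    intro l acc hlen
    have hl : l = [] := List.length_eq_zero_iff.mp (Nat.le_zero.mp hlen)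
    subst hl
    rw [PySem.Chars.replace.go, pvScan_nil]
  | succ fuel ih =>
    intro l acc hlen
    cases l with
    | nil =>
      rw [PySem.Chars.replace.go, pvScan_nil]
      · simp
      · omega
    | cons c t =>
      rw [PySem.Chars.replace.go]
      by_cases hpre : old.isPrefixOf (c :: t)
      · rw [if_pos hpre]
        have hol : 1 ≤ old.length := List.length_pos_of_ne_nil hold
        have hdl : (List.drop old.length (c :: t)).length ≤ fuel := by
          simp only [List.length_drop, List.length_cons] at *
          omega
        rw [ih _ _ hdl]
        have hfm : pvFirstMatch [(old, new)] (c :: t) = some (old, new) := by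
          rw [pvFirstMatch, if_pos ⟨hold, hpre⟩]
        rw [pvScan_some hfm]
        simp
      · rw [if_neg hpre]
        rw [ih t (c :: acc) (Nat.succ_le_succ_iff.mp hlen)]
        have hfm : pvFirstMatch [(old, new)] (c :: t) = none := by
          rw [pvFirstMatch_none_iff]
          intro r hr hne
          have hrr : r = (old, new) := List.mem_singleton.mp hr
          subst hrr
          intro habs
          exact hpre (List.isPrefixOf_iff_prefix.mpr habs)
        rw [pvScan_none hfm]
        simp

lemma pv_replace_eq (s old new : List Char) (hold : old ≠ []) :
    PySem.Chars.replace s old new = pvScan [(old, new)] s := by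
  rw [PySem.Chars.replace, if_neg (by simp [List.isEmpty_iff, hold])]
  rw [pv_go_eq old new hold s.length s [] le_rfl]
  simp

-- ===== A unfolded to four chained single-rule scans, then combined =====
lemma pvA_eq (line : String) :
    fix_urls line = String.ofList (pvScan [(pvRootH, pvTarget)] (pvScan [(pvRootS, pvTarget)]
      (pvScan [(pvP2, pvT1)] (pvScan [(pvP1, pvT1)] line.toList)))) := by
  show String.ofList (PySem.Chars.replace (String.ofList (PySem.Chars.replace (String.ofList
      (PySem.Chars.replace (String.ofList (PySem.Chars.replace line.toList pvP1 pvT1)).toList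
        pvP2 pvT1)).toList pvRootS pvTarget)).toList pvRootH pvTarget) = _
  rw [String.toList_ofList, String.toList_ofList, String.toList_ofList,
    pv_replace_eq _ pvP1 pvT1 (by decide), pv_replace_eq _ pvP2 pvT1 (by decide),
    pv_replace_eq _ pvRootS pvTarget (by decide), pv_replace_eq _ pvRootH pvTarget (by decide)]

lemma pvA_comb (line : String) :
    fix_urls line = String.ofList
      (pvScan [(pvP1, pvT1), (pvP2, pvT1), (pvRootS, pvTarget), (pvRootH, pvTarget)] line.toList) := by
  rw [pvA_eq,
    pvComp [(pvP1, pvT1)] pvP2 pvT1 (by decide) (by decide) (by decide) (by decide) (by decide)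
      (by decide)]
  simp only [List.cons_append, List.nil_append]
  rw [pvComp [(pvP1, pvT1), (pvP2, pvT1)] pvRootS pvTarget (by decide) (by decide) (by decide)
      (by decide) (by decide) (by decide)]
  simp only [List.cons_append, List.nil_append]
  rw [pvComp [(pvP1, pvT1), (pvP2, pvT1), (pvRootS, pvTarget)] pvRootH pvTarget (by decide)
      (by decide) (by decide) (by decide) (by decide) (by decide)]
  simp only [List.cons_append, List.nil_append]

-- two prefixes of the same string cannot disagree at a common index
lemma pv_prefix_clash {p q s : List Char} (hp : p <+: s) (hq : q <+: s) (j : Nat)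
    (hjp : j < p.length) (hjq : j < q.length) (hne : p[j]? ≠ q[j]?) : False := by
  obtain ⟨a, ha⟩ := hp
  obtain ⟨b, hb⟩ := hq
  have h1 : s[j]? = p[j]? := by
    rw [← ha]
    exact List.getElem?_append_left hjp
  have h2 : s[j]? = q[j]? := by
    rw [← hb]
    exact List.getElem?_append_left hjq
  exact hne (h1 ▸ h2)

-- the root scanner copies the uploads tail "wp-content/uploads/" verbatim
lemma pvW_pass (x : List Char) :
    pvScan [(pvRootS, pvTarget), (pvRootH, pvTarget)] (pvW ++ x)
      = pvW ++ pvScan [(pvRootS, pvTarget), (pvRootH, pvTarget)] x := by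
  apply pvScan_append
  intro i hi r hr hne
  have hr' : r = (pvRootS, pvTarget) ∨ r = (pvRootH, pvTarget) := by simpa using hr
  have hh : r.1[0]? = some 'h' := by rcases hr' with rfl | rfl <;> decide
  apply pv_not_prefix_h hh
  · intro h0
    have := congrArg List.length h0
    simp only [List.length_drop, List.length_nil] at this
    omega
  · intro hmem
    have hW : 'h' ∉ pvW := by decide
    exact hW (List.drop_subset _ _ hmem)

-- the four-rule scanner coincides with the two-root scanner
lemma pv_four_roots : ∀ s : List Char,
    pvScan [(pvP1, pvT1), (pvP2, pvT1), (pvRootS, pvTarget), (pvRootH, pvTarget)] s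
      = pvScan [(pvRootS, pvTarget), (pvRootH, pvTarget)] s := by
  suffices H : ∀ n, ∀ s : List Char, s.length ≤ n →
      pvScan [(pvP1, pvT1), (pvP2, pvT1), (pvRootS, pvTarget), (pvRootH, pvTarget)] s
        = pvScan [(pvRootS, pvTarget), (pvRootH, pvTarget)] s by
    intro s
    exact H s.length s le_rfl
  intro n
  induction n with
  | zero =>
    intro s hlen
    have hs : s = [] := List.length_eq_zero_iff.mp (Nat.le_zero.mp hlen)
    subst hs
    rw [pvScan_nil, pvScan_nil]
  | succ n ih =>
    intro s hlen
    cases s with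
    | nil => rw [pvScan_nil, pvScan_nil]
    | cons c t =>
      by_cases h1 : pvP1 <+: (c :: t)
      · have hfm4 : pvFirstMatch [(pvP1, pvT1), (pvP2, pvT1), (pvRootS, pvTarget),
            (pvRootH, pvTarget)] (c :: t) = some (pvP1, pvT1) := by
          rw [pvFirstMatch, if_pos ⟨by decide, List.isPrefixOf_iff_prefix.mpr h1⟩]
        have hS : pvRootS <+: (c :: t) := List.IsPrefix.trans (by decide) h1
        have hfm2 : pvFirstMatch [(pvRootS, pvTarget), (pvRootH, pvTarget)] (c :: t)
            = some (pvRootS, pvTarget) := by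
          rw [pvFirstMatch, if_pos ⟨by decide, List.isPrefixOf_iff_prefix.mpr hS⟩]
        obtain ⟨r, hr⟩ := h1
        rw [pvScan_some hfm4, pvScan_some hfm2, ← hr, List.drop_left,
          List.drop_append,
          show List.drop pvRootS.length pvP1 = pvW by decide,
          show pvRootS.length - pvP1.length = 0 by decide, List.drop_zero, pvW_pass]
        have hrlen : r.length ≤ n := by
          have hl := congrArg List.length hr
          have h40 : 1 ≤ pvP1.length := by decide
          simp only [List.length_append, List.length_cons] at hl
          simp only [List.length_cons] at hlen
          omega
        rw [ih r hrlen, ← List.append_assoc]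
        congr 1
      · by_cases h2 : pvP2 <+: (c :: t)
        · have hfm4 : pvFirstMatch [(pvP1, pvT1), (pvP2, pvT1), (pvRootS, pvTarget),
              (pvRootH, pvTarget)] (c :: t) = some (pvP2, pvT1) := by
            rw [pvFirstMatch,
              if_neg (fun hc => h1 (List.isPrefixOf_iff_prefix.mp hc.2)),
              pvFirstMatch, if_pos ⟨by decide, List.isPrefixOf_iff_prefix.mpr h2⟩]
          have hnS : ¬ pvRootS <+: (c :: t) := fun hS =>
            pv_prefix_clash hS h2 4 (by decide) (by decide) (by decide)
          have hH : pvRootH <+: (c :: t) := List.IsPrefix.trans (by decide) h2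
          have hfm2 : pvFirstMatch [(pvRootS, pvTarget), (pvRootH, pvTarget)] (c :: t)
              = some (pvRootH, pvTarget) := by
            rw [pvFirstMatch,
              if_neg (fun hc => hnS (List.isPrefixOf_iff_prefix.mp hc.2)),
              pvFirstMatch, if_pos ⟨by decide, List.isPrefixOf_iff_prefix.mpr hH⟩]
          obtain ⟨r, hr⟩ := h2
          rw [pvScan_some hfm4, pvScan_some hfm2, ← hr, List.drop_left,
            List.drop_append,
            show List.drop pvRootH.length pvP2 = pvW by decide,
            show pvRootH.length - pvP2.length = 0 by decide, List.drop_zero, pvW_pass]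
          have hrlen : r.length ≤ n := by
            have hl := congrArg List.length hr
            have h39 : 1 ≤ pvP2.length := by decide
            simp only [List.length_append, List.length_cons] at hl
            simp only [List.length_cons] at hlen
            omega
          rw [ih r hrlen, ← List.append_assoc]
          congr 1
        · by_cases h3 : pvRootS <+: (c :: t)
          · have hfm4 : pvFirstMatch [(pvP1, pvT1), (pvP2, pvT1), (pvRootS, pvTarget),
                (pvRootH, pvTarget)] (c :: t) = some (pvRootS, pvTarget) := by
              rw [pvFirstMatch,
                if_neg (fun hc => h1 (List.isPrefixOf_iff_prefix.mp hc.2)),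
                pvFirstMatch,
                if_neg (fun hc => h2 (List.isPrefixOf_iff_prefix.mp hc.2)),
                pvFirstMatch, if_pos ⟨by decide, List.isPrefixOf_iff_prefix.mpr h3⟩]
            have hfm2 : pvFirstMatch [(pvRootS, pvTarget), (pvRootH, pvTarget)] (c :: t)
                = some (pvRootS, pvTarget) := by
              rw [pvFirstMatch, if_pos ⟨by decide, List.isPrefixOf_iff_prefix.mpr h3⟩]
            have hdlen : ((c :: t).drop pvRootS.length).length ≤ n := by
              have h21 : 1 ≤ pvRootS.length := by decide
              simp only [List.length_drop, List.length_cons] at *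
              omega
            rw [pvScan_some hfm4, pvScan_some hfm2, ih _ hdlen]
          · by_cases h4 : pvRootH <+: (c :: t)
            · have hfm4 : pvFirstMatch [(pvP1, pvT1), (pvP2, pvT1), (pvRootS, pvTarget),
                  (pvRootH, pvTarget)] (c :: t) = some (pvRootH, pvTarget) := by
                rw [pvFirstMatch,
                  if_neg (fun hc => h1 (List.isPrefixOf_iff_prefix.mp hc.2)),
                  pvFirstMatch,
                  if_neg (fun hc => h2 (List.isPrefixOf_iff_prefix.mp hc.2)),
                  pvFirstMatch,
                  if_neg (fun hc => h3 (List.isPrefixOf_iff_prefix.mp hc.2)),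
                  pvFirstMatch, if_pos ⟨by decide, List.isPrefixOf_iff_prefix.mpr h4⟩]
              have hfm2 : pvFirstMatch [(pvRootS, pvTarget), (pvRootH, pvTarget)] (c :: t)
                  = some (pvRootH, pvTarget) := by
                rw [pvFirstMatch,
                  if_neg (fun hc => h3 (List.isPrefixOf_iff_prefix.mp hc.2)),
                  pvFirstMatch, if_pos ⟨by decide, List.isPrefixOf_iff_prefix.mpr h4⟩]
              have hdlen : ((c :: t).drop pvRootH.length).length ≤ n := by
                have h20 : 1 ≤ pvRootH.length := by decide
                simp only [List.length_drop, List.length_cons] at *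
                omega
              rw [pvScan_some hfm4, pvScan_some hfm2, ih _ hdlen]
            · have hfm4 : pvFirstMatch [(pvP1, pvT1), (pvP2, pvT1), (pvRootS, pvTarget),
                  (pvRootH, pvTarget)] (c :: t) = none := by
                rw [pvFirstMatch_none_iff]
                intro r hr hne
                simp only [List.mem_cons, List.not_mem_nil, or_false] at hr
                rcases hr with rfl | rfl | rfl | rfl
                · exact h1
                · exact h2
                · exact h3
                · exact h4
              have hfm2 : pvFirstMatch [(pvRootS, pvTarget), (pvRootH, pvTarget)] (c :: t)
                  = none := by
                rw [pvFirstMatch_none_iff]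
                intro r hr hne
                simp only [List.mem_cons, List.not_mem_nil, or_false] at hr
                rcases hr with rfl | rfl
                · exact h3
                · exact h4
              rw [pvScan_none hfm4, pvScan_none hfm2,
                ih t (Nat.succ_le_succ_iff.mp hlen)]

-- B's loop is the two-root scanner with an output accumulator
lemma pvB_eq : ∀ (l acc : List Char),
    pvFixGo acc l = acc ++ pvScan [(pvRootS, pvTarget), (pvRootH, pvTarget)] l := by
  suffices H : ∀ n, ∀ (l acc : List Char), l.length ≤ n →
      pvFixGo acc l = acc ++ pvScan [(pvRootS, pvTarget), (pvRootH, pvTarget)] l by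
    intro l acc
    exact H l.length l acc le_rfl
  intro n
  induction n with
  | zero =>
    intro l acc hlen
    have hl : l = [] := List.length_eq_zero_iff.mp (Nat.le_zero.mp hlen)
    subst hl
    rw [pvFixGo, pvScan_nil, List.append_nil]
  | succ n ih =>
    intro l acc hlen
    cases l with
    | nil => rw [pvFixGo, pvScan_nil, List.append_nil]
    | cons c t =>
      rw [pvFixGo]
      by_cases hS : pvRootS.isPrefixOf (c :: t)
      · rw [if_pos hS]
        have hd : (t.drop 20).length ≤ n := by
          simp only [List.length_drop, List.length_cons] at *
          omega
        rw [ih _ _ hd]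
        have hfm : pvFirstMatch [(pvRootS, pvTarget), (pvRootH, pvTarget)] (c :: t)
            = some (pvRootS, pvTarget) := by
          rw [pvFirstMatch, if_pos ⟨by decide, hS⟩]
        rw [pvScan_some hfm, show pvRootS.length = 20 + 1 by decide, List.drop_succ_cons,
          List.append_assoc]
      · rw [if_neg hS]
        by_cases hH : pvRootH.isPrefixOf (c :: t)
        · rw [if_pos hH]
          have hd : (t.drop 19).length ≤ n := by
            simp only [List.length_drop, List.length_cons] at *
            omega
          rw [ih _ _ hd]
          have hfm : pvFirstMatch [(pvRootS, pvTarget), (pvRootH, pvTarget)] (c :: t)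
              = some (pvRootH, pvTarget) := by
            rw [pvFirstMatch,
              if_neg (fun hc => (by simpa [List.isPrefixOf_iff_prefix] using hS : ¬ pvRootS <+: (c :: t)) (List.isPrefixOf_iff_prefix.mp hc.2)),
              pvFirstMatch, if_pos ⟨by decide, hH⟩]
          rw [pvScan_some hfm, show pvRootH.length = 19 + 1 by decide, List.drop_succ_cons,
            List.append_assoc]
        · rw [if_neg hH]
          have hd : t.length ≤ n := Nat.succ_le_succ_iff.mp hlen
          rw [ih _ _ hd]
          have hfm : pvFirstMatch [(pvRootS, pvTarget), (pvRootH, pvTarget)] (c :: t)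
              = none := by
            rw [pvFirstMatch_none_iff]
            intro r hr hne
            simp only [List.mem_cons, List.not_mem_nil, or_false] at hr
            rcases hr with rfl | rfl
            · exact fun h => hS (List.isPrefixOf_iff_prefix.mpr h)
            · exact fun h => hH (List.isPrefixOf_iff_prefix.mpr h)
          rw [pvScan_none hfm, List.append_assoc, List.singleton_append]

-- ===== VERDICT (by name: the statement is the Claim_ definition above) =====
theorem fix_urls_spec : Claim_equal_fix_urls := by
  intro line _
  unfold Spec_fix_urls fix_urls_alt
  rw [pvA_comb, pv_four_roots line.toList, pvB_eq line.toList [], List.nil_append]
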